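-- pv_equiv track=rewrite | github.com/marioamz/PopCulture | build_dict_feelings.py | basic_counts
-- ===== SOURCE A (Python) =====
-- def basic_counts(words_lst, syn, target_dict):
--     '''
--     This function tokenizes all the lyrics, and compares them to synonyms of
--     our primal emotions
--     '''
--     for word in words_lst:
--         for i, ls in syn.items():
--             if word in ls:
--                 if i not in target_dict:
--                     target_dict[i] = 0
--                 target_dict[i] +=1
--                 continue
--     return target_dict
-- ===== SOURCE B (Python) =====
-- def basic_counts(words_lst, syn, target_dict):
--     # Inverted index word -> list of matching emotion keys (in syn order),
--     # then one dict lookup per word instead of scanning every synonym list.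
--     # Like A, mutates target_dict in place and returns it.
--     index = {}
--     for key, ls in syn.items():
--         for w in dict.fromkeys(ls):
--             index.setdefault(w, []).append(key)
--     for word in words_lst:
--         for key in index.get(word, ()):
--             if key not in target_dict:
--                 target_dict[key] = 0
--             target_dict[key] += 1
--     return target_dict
-- ===== Notes on version B (the rewrite author's own statement) =====
-- stated objective: faster
-- what changed: B precomputes an inverted index mapping each synonym word to the list of emotion keys whose synonym list contains it, then handles each lyric word with a single dict lookup instead of scanning every synonym list per word.
import Mathlib
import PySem

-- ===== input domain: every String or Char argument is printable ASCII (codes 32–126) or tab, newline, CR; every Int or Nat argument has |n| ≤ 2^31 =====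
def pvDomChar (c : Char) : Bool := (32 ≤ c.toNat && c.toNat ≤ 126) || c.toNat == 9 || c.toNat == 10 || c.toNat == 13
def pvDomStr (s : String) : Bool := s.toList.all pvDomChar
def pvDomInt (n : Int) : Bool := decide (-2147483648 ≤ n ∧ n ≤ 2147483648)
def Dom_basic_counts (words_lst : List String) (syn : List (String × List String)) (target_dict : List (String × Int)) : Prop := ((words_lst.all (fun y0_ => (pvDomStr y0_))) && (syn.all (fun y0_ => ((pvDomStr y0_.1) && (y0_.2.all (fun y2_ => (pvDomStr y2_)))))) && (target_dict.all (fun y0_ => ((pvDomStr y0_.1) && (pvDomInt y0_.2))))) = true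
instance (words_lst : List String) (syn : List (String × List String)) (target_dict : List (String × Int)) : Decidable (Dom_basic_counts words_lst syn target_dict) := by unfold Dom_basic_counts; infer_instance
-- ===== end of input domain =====

-- ===== PORT A =====
-- Literal port of A: for each word, scan every (key, synonym-list) pair; on a
-- membership hit, ensure the key exists in target_dict and increment it.
def basic_counts (words_lst : List String) (syn : List (String × List String)) (target_dict : List (String × Int)) : List (String × Int) :=
  (words_lst.foldl (fun td word =>
      syn.foldl (fun td p =>
        if p.2.contains word then
          let td := if td.contains p.1 then td else td.insert p.1 (0 : Int)
          td.insert p.1 (td.getD p.1 0 + 1)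
        else td) td)
    (PySem.Dict.ofList target_dict)).items

-- ===== PORT B =====
-- B's inverted index: word -> list of keys whose synonym list contains it
-- (dict.fromkeys(ls) dedup = PySem.List.dedup; setdefault(w,[]).append(key) = modify w [] (· ++ [key])).
def pvIndex (syn : List (String × List String)) : PySem.Dict String (List String) :=
  syn.foldl (fun idx p =>
    (PySem.List.dedup p.2).foldl (fun idx w => idx.modify w [] (· ++ [p.1])) idx)
    PySem.Dict.empty

def basic_counts_alt (words_lst : List String) (syn : List (String × List String)) (target_dict : List (String × Int)) : List (String × Int) :=
  let index := pvIndex syn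
  (words_lst.foldl (fun td word =>
      (index.getD word []).foldl (fun td key =>
        let td := if td.contains key then td else td.insert key (0 : Int)
        td.insert key (td.getD key 0 + 1)) td)
    (PySem.Dict.ofList target_dict)).items

-- ===== PRECONDITION & SPEC =====
def Spec_basic_counts (words_lst : List String) (syn : List (String × List String)) (target_dict : List (String × Int)) (out : List (String × Int)) : Prop := out = basic_counts_alt words_lst syn target_dict
instance (words_lst : List String) (syn : List (String × List String)) (target_dict : List (String × Int)) (out : List (String × Int)) : Decidable (Spec_basic_counts words_lst syn target_dict out) := by unfold Spec_basic_counts; infer_instance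

-- ===== CLAIM (what is proved, stated in full; the proofs are below) =====
def Claim_equal_basic_counts : Prop := ∀ (words_lst : List String) (syn : List (String × List String)) (target_dict : List (String × Int)), Dom_basic_counts words_lst syn target_dict → Spec_basic_counts words_lst syn target_dict (basic_counts words_lst syn target_dict)

-- ===== LEMMAS AND PROOFS =====

-- the increment step both Pythons share textually; used only to state the lemmas below
def pvInc (td : PySem.Dict String Int) (k : String) : PySem.Dict String Int :=
  let td := if td.contains k then td else td.insert k (0 : Int)
  td.insert k (td.getD k 0 + 1)

-- per synonym list: folding modify over the deduped list appends the key to word's bucket iff word ∈ ls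
lemma pvIndex_pair (ls : List String) (k : String) (idx : PySem.Dict String (List String)) (word : String) :
    ((PySem.List.dedup ls).foldl (fun idx w => idx.modify w [] (· ++ [k])) idx).getD word []
      = idx.getD word [] ++ (if ls.contains word then [k] else []) := by
  have h1 : (PySem.List.dedup ls).foldl (fun idx w => idx.modify w [] (· ++ [k])) idx
      = ((PySem.List.dedup ls).map (fun w => (w, k))).foldl (fun d p => d.modify p.1 [] (· ++ [p.2])) idx := by
    rw [List.foldl_map]
  rw [h1, PySem.Dict.getD_foldl_modify_append]
  congr 1
  rw [List.filter_map]
  have h2 : (PySem.List.dedup ls).filter ((fun p => p.1 == word) ∘ (fun w => (w, k)))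
      = if word ∈ ls then [word] else [] := by
    have hb : ((fun p => p.1 == word) ∘ (fun w : String => (w, k))) = (fun w => w == word) := rfl
    rw [hb, List.filter_beq]
    by_cases h : word ∈ ls
    · rw [List.count_eq_one_of_mem (PySem.List.nodup_dedup ls) ((PySem.List.mem_dedup ls word).mpr h)]
      simp [h]
    · rw [List.count_eq_zero_of_not_mem (fun hc => h ((PySem.List.mem_dedup ls word).mp hc))]
      simp [h]
  rw [h2]
  by_cases h : word ∈ ls <;> simp [h]

-- the bucket pvIndex builds for a word is exactly the keys of the matching pairs, in syn order
lemma pvIndex_getD_aux (syn : List (String × List String)) (word : String) :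
    ∀ (idx : PySem.Dict String (List String)),
      (syn.foldl (fun (idx : PySem.Dict String (List String)) (p : String × List String) =>
        (PySem.List.dedup p.2).foldl (fun idx w => idx.modify w [] (· ++ [p.1])) idx) idx).getD word []
      = idx.getD word [] ++ (syn.filter (fun p => p.2.contains word)).map (·.1) := by
  induction syn with
  | nil => intro idx; simp
  | cons p rest ih =>
    intro idx
    simp only [List.foldl_cons, ih, pvIndex_pair]
    by_cases h : word ∈ p.2 <;> simp [h]

lemma pvIndex_getD (syn : List (String × List String)) (word : String) :
    (pvIndex syn).getD word [] = (syn.filter (fun p => p.2.contains word)).map (·.1) := by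
  rw [pvIndex, pvIndex_getD_aux]; simp

-- A's guarded scan over syn = folding the increment over the matching keys only
lemma pvFoldl_filter_map {α β : Type} (c : α → Bool) (key : α → β) (g : PySem.Dict String Int → β → PySem.Dict String Int) :
    ∀ (l : List α) (td : PySem.Dict String Int),
      l.foldl (fun td p => if c p then g td (key p) else td) td
        = ((l.filter c).map key).foldl g td := by
  intro l
  induction l with
  | nil => intro td; simp
  | cons p rest ih =>
    intro td
    by_cases h : c p <;> simp [h, ih]

-- ===== VERDICT (by name: the statement is the Claim_ definition above) =====
theorem basic_counts_spec : Claim_equal_basic_counts := by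
  intro words_lst syn target_dict _
  unfold Spec_basic_counts basic_counts basic_counts_alt
  show _ = (words_lst.foldl (fun td word => ((pvIndex syn).getD word []).foldl pvInc td)
    (PySem.Dict.ofList target_dict)).items
  congr 1
  apply PySem.List.foldl_congr_mem
  intro td word _
  show syn.foldl (fun td p => if p.2.contains word then pvInc td p.1 else td) td = _
  rw [pvIndex_getD]
  exact pvFoldl_filter_map (fun p => p.2.contains word) (fun p => p.1) pvInc syn td
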